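-- pv_equiv track=rewrite | github.com/wingsofphoenix2013/v4 | laboratory_v4/laboratory_decision_filler.py | _parse_timeframes
-- ===== SOURCE A (Python) =====
-- from typing import Any, Dict, List, Optional, Tuple
--
-- TF_ORDER = ("m5", "m15", "h1")
--
-- def _parse_timeframes(tf_str: str) -> List[str]:
--     items = [x.strip().lower() for x in (tf_str or "").split(",") if x.strip()]
--     seen, ordered = set(), []
--     for tf in TF_ORDER:
--         if tf in items and tf not in seen:
--             seen.add(tf)
--             ordered.append(tf)
--     return ordered
-- ===== SOURCE B (Python) =====
-- TF_ORDER = ("m5", "m15", "h1")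
--
-- def _parse_timeframes(tf_str):
--     items = [x.strip().lower() for x in (tf_str or "").split(",") if x.strip()]
--     present = {tf for tf in items if tf in TF_ORDER}
--     return sorted(present, key=TF_ORDER.index)
-- ===== Notes on version B (the rewrite author's own statement) =====
-- stated objective: alternative
-- what changed: Instead of probing each TF_ORDER entry against the parsed tokens (fixed-order scan with a seen-set), B gathers the set of recognized timeframes present in the input and sorts it by TF_ORDER.index.
import Mathlib
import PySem

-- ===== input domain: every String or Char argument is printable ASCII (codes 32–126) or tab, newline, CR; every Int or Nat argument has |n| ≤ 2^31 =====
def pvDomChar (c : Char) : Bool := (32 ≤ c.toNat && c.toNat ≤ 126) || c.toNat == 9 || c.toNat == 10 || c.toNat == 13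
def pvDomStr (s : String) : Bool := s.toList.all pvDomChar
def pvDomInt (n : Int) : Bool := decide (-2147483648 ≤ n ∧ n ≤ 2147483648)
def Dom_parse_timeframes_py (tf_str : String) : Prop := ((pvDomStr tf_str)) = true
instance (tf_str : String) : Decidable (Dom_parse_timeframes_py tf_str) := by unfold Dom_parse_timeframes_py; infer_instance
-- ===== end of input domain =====

-- B replaces A's fixed-order probe loop over TF_ORDER by gathering the recognized
-- timeframes present in the input and sorting them by TF_ORDER.index (objective: alternative).

-- TF_ORDER = ("m5", "m15", "h1")
def pvTFOrder : List String := ["m5", "m15", "h1"]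

-- items = [x.strip().lower() for x in (tf_str or "").split(",") if x.strip()]
-- (sep "," ≠ "" so split? is some and getD is exact; identical first line in A and B; 'tf_str or ""' = tf_str for a str argument)
def pvItems (tf_str : String) : List String :=
  (((PySem.Str.split? tf_str ",").getD []).filter (fun x => PySem.Str.strip x != "")).map
    (fun x => PySem.Str.lower (PySem.Str.strip x))

-- ===== PORT A =====
def parse_timeframes_py (tf_str : String) : List String :=
  let items := pvItems tf_str
  let st := pvTFOrder.foldl
    (fun (st : PySem.Set String × List String) tf =>
      if items.contains tf && !(PySem.Set.contains st.1 tf) then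
        (PySem.Set.add st.1 tf, st.2 ++ [tf])
      else st)
    (PySem.Set.empty, [])
  st.2

-- ===== PORT B =====
-- key TF_ORDER.index: index? is some for every element of `present` (all lie in
-- TF_ORDER, the filter guarantees it), so the getD default is never used — exact.
def parse_timeframes_py_alt (tf_str : String) : List String :=
  let items := pvItems tf_str
  let present : PySem.Set String := PySem.Set.ofList (items.filter (fun tf => pvTFOrder.contains tf))
  PySem.List.sorted present (fun tf => (((PySem.List.index? pvTFOrder tf).getD 0 : Nat) : Int)) false

-- ===== PRECONDITION & SPEC =====
def Spec_parse_timeframes_py (tf_str : String) (out : List String) : Prop := out = parse_timeframes_py_alt tf_str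
instance (tf_str : String) (out : List String) : Decidable (Spec_parse_timeframes_py tf_str out) := by unfold Spec_parse_timeframes_py; infer_instance

-- ===== CLAIM (what is proved, stated in full; the proofs are below) =====
def Claim_equal_parse_timeframes_py : Prop := ∀ (tf_str : String), Dom_parse_timeframes_py tf_str → Spec_parse_timeframes_py tf_str (parse_timeframes_py tf_str)

-- ===== LEMMAS AND PROOFS =====

-- the heart: for ANY items list, A's probe loop and B's gather-then-sort agree
-- membership in B's gathered set is exactly "recognized and present in items"
lemma pv_mem_present (items : List String) (a : String) :
    a ∈ PySem.Set.ofList (items.filter (fun tf => pvTFOrder.contains tf)) ↔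
      (a = "m5" ∨ a = "m15" ∨ a = "h1") ∧ a ∈ items := by
  simp [PySem.Set.mem_ofList, List.mem_filter, pvTFOrder, and_comm]

-- A's probe loop just filters TF_ORDER by presence in items
lemma pv_foldA (items : List String) :
    (pvTFOrder.foldl
      (fun (st : PySem.Set String × List String) tf =>
        if items.contains tf && !(PySem.Set.contains st.1 tf) then
          (PySem.Set.add st.1 tf, st.2 ++ [tf])
        else st)
      (PySem.Set.empty, [])).2
    = pvTFOrder.filter (fun tf => items.contains tf) := by
  by_cases h5 : "m5" ∈ items <;> by_cases h15 : "m15" ∈ items <;> by_cases h1 : "h1" ∈ items <;>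
    simp_all [pvTFOrder, List.foldl, PySem.Set.empty, PySem.Set.add, PySem.Set.contains,
      List.filter]

-- B's sort-by-TF_ORDER.index also yields TF_ORDER filtered by presence in items
lemma pv_sortB (items : List String) :
    PySem.List.sorted (PySem.Set.ofList (items.filter (fun tf => pvTFOrder.contains tf)))
        (fun tf => (((PySem.List.index? pvTFOrder tf).getD 0 : Nat) : Int)) false
    = pvTFOrder.filter (fun tf => items.contains tf) := by
  refine PySem.List.sorted_eq_of_perm_of_pairwise_lt _ _ _ ?_ ?_
  · refine (List.perm_ext_iff_of_nodup (List.Nodup.filter _ (by decide))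
      (PySem.Set.nodup_ofList _)).mpr ?_
    intro a
    rw [pv_mem_present]
    simp only [List.mem_filter, pvTFOrder, List.contains_iff_mem, List.mem_cons,
      List.not_mem_nil, or_false]
  · refine List.Pairwise.sublist List.filter_sublist ?_
    decide

lemma pv_core (items : List String) :
    (pvTFOrder.foldl
      (fun (st : PySem.Set String × List String) tf =>
        if items.contains tf && !(PySem.Set.contains st.1 tf) then
          (PySem.Set.add st.1 tf, st.2 ++ [tf])
        else st)
      (PySem.Set.empty, [])).2
    = PySem.List.sorted (PySem.Set.ofList (items.filter (fun tf => pvTFOrder.contains tf)))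
        (fun tf => (((PySem.List.index? pvTFOrder tf).getD 0 : Nat) : Int)) false :=
  (pv_foldA items).trans (pv_sortB items).symm

theorem parse_timeframes_py_spec_aux (tf_str : String) :
    parse_timeframes_py tf_str = parse_timeframes_py_alt tf_str := by
  unfold parse_timeframes_py parse_timeframes_py_alt
  exact pv_core (pvItems tf_str)

-- ===== VERDICT (by name: the statement is the Claim_ definition above) =====
theorem parse_timeframes_py_spec : Claim_equal_parse_timeframes_py := by
  intro tf_str _
  exact parse_timeframes_py_spec_aux tf_str
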